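-- pv_equiv track=rewrite | github.com/LongWeeeeeee/dota2_bets | egb.py | spread_heroes_left
-- ===== SOURCE A (Python) =====
-- def spread_heroes_left(heroes_left, radiant_hard, radiant_safe, radiant_mid, dire_hard, dire_safe, dire_mid):
--     for player in heroes_left:
--         if player['isRadiant']:
--             if len(radiant_hard) == 1:
--                 radiant_hard.append(player)
--             elif len(radiant_safe) == 1:
--                 radiant_safe.append(player)
--             elif len(radiant_mid) == 0:
--                 radiant_mid.append(player)
--         elif not player['isRadiant']:
--             if len(dire_hard) == 1:
--                 dire_hard.append(player)
--             elif len(dire_safe) == 1: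
--                 dire_safe.append(player)
--             elif len(dire_mid) == 0:
--                 dire_mid.append(player)
--     return radiant_hard, radiant_safe, radiant_mid, dire_hard, dire_safe, dire_mid
-- ===== SOURCE B (Python) =====
-- def spread_heroes_left(heroes_left, radiant_hard, radiant_safe, radiant_mid, dire_hard, dire_safe, dire_mid):
--     radiant = [p for p in heroes_left if p['isRadiant']]
--     dire = [p for p in heroes_left if not p['isRadiant']]
--     for team, buckets in ((radiant, [(radiant_hard, 1), (radiant_safe, 1), (radiant_mid, 0)]),
--                           (dire, [(dire_hard, 1), (dire_safe, 1), (dire_mid, 0)])):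
--         open_buckets = [b for b, need in buckets if len(b) == need]
--         for b, p in zip(open_buckets, team):
--             b.append(p)
--     return radiant_hard, radiant_safe, radiant_mid, dire_hard, dire_safe, dire_mid
-- ===== Notes on version B (the rewrite author's own statement) =====
-- stated objective: simpler
-- what changed: B first splits heroes_left into radiant/dire lists, precomputes each team's open buckets once (hard/safe need length 1, mid needs length 0), and zips the open buckets with the team's players, instead of A's per-player if/elif chain re-testing bucket lengths; each open bucket takes exactly one player, so the assignments coincide.
import Mathlib
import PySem

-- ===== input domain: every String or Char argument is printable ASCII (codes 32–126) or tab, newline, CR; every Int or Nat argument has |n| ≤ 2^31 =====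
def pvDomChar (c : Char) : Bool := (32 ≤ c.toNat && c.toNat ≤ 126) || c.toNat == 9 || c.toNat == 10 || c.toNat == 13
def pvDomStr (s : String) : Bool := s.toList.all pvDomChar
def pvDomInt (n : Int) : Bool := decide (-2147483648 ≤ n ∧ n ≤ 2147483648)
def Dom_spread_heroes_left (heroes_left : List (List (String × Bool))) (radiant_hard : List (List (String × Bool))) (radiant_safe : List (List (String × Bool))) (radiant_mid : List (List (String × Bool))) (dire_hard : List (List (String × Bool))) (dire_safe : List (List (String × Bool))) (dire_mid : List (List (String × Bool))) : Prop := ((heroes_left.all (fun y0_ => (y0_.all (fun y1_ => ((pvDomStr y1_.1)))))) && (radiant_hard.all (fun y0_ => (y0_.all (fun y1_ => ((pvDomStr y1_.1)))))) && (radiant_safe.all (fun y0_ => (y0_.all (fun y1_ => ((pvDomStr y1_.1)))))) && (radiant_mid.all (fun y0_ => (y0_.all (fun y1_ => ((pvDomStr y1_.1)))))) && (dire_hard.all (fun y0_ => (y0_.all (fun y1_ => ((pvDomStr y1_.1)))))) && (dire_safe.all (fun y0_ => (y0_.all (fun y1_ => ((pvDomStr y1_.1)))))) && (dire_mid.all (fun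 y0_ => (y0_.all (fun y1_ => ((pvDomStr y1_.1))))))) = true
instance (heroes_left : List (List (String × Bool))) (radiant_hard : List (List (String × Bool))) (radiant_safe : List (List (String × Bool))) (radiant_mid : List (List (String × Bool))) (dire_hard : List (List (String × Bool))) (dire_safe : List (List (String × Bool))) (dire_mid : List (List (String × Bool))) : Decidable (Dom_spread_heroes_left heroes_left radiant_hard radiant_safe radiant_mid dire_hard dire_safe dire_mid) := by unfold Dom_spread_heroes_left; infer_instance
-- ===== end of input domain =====

-- ===== PORT A =====
-- B redistributes via filter + zip of the precomputed open buckets instead of per-player if/elif chains (objective: simpler).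
-- A mutates the six bucket lists in place in Python; the equivalence proved is about the returned 6-tuple (Python B performs the same appends).
-- player['isRadiant'] is a dict lookup (first match in the association list); KeyError when the key is absent is excluded by Pre_.
def pvIsRad (player : List (String × Bool)) : Bool :=
  ((player.find? (fun kv => kv.1 == "isRadiant")).map Prod.snd).getD false

def pvStepA (st : (List (List (String × Bool))) × (List (List (String × Bool))) × (List (List (String × Bool))) × (List (List (String × Bool))) × (List (List (String × Bool))) × (List (List (String × Bool)))) (player : List (String × Bool)) : (List (List (String × Bool))) × (List (List (String × Bool))) × (List (List (String × Bool))) × (List (List (String × Bool))) × (List (List (String × Bool))) × (List (List (String × Bool))) :=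
  let (rh, rs, rm, dh, ds, dm) := st
  if pvIsRad player then
    if rh.length = 1 then (rh ++ [player], rs, rm, dh, ds, dm)
    else if rs.length = 1 then (rh, rs ++ [player], rm, dh, ds, dm)
    else if rm.length = 0 then (rh, rs, rm ++ [player], dh, ds, dm)
    else (rh, rs, rm, dh, ds, dm)
  else if pvIsRad player = false then
    if dh.length = 1 then (rh, rs, rm, dh ++ [player], ds, dm)
    else if ds.length = 1 then (rh, rs, rm, dh, ds ++ [player], dm)
    else if dm.length = 0 then (rh, rs, rm, dh, ds, dm ++ [player])
    else (rh, rs, rm, dh, ds, dm)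
  else (rh, rs, rm, dh, ds, dm)

def spread_heroes_left (heroes_left : List (List (String × Bool))) (radiant_hard : List (List (String × Bool))) (radiant_safe : List (List (String × Bool))) (radiant_mid : List (List (String × Bool))) (dire_hard : List (List (String × Bool))) (dire_safe : List (List (String × Bool))) (dire_mid : List (List (String × Bool))) : (List (List (String × Bool))) × (List (List (String × Bool))) × (List (List (String × Bool))) × (List (List (String × Bool))) × (List (List (String × Bool))) × (List (List (String × Bool))) :=
  heroes_left.foldl pvStepA (radiant_hard, radiant_safe, radiant_mid, dire_hard, dire_safe, dire_mid)

-- ===== PORT B =====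
-- open_buckets = [b for b, need in buckets if len(b) == need], encoded by slot index 0=hard, 1=safe, 2=mid
def pvOpens (h s m : List (List (String × Bool))) : List Nat :=
  (if h.length = 1 then [0] else []) ++ (if s.length = 1 then [1] else []) ++ (if m.length = 0 then [2] else [])

-- for b, p in zip(open_buckets, team): b.append(p)
def pvAssign : List (Nat × List (String × Bool)) → (List (List (String × Bool))) × (List (List (String × Bool))) × (List (List (String × Bool))) → (List (List (String × Bool))) × (List (List (String × Bool))) × (List (List (String × Bool)))
  | [], st => st
  | (i, p) :: rest, (h, s, m) =>
      pvAssign rest (if i = 0 then (h ++ [p], s, m) else if i = 1 then (h, s ++ [p], m) else (h, s, m ++ [p]))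

def pvFillTeam (h s m : List (List (String × Bool))) (team : List (List (String × Bool))) : (List (List (String × Bool))) × (List (List (String × Bool))) × (List (List (String × Bool))) :=
  pvAssign ((pvOpens h s m).zip team) (h, s, m)

def pvJoin (r d : (List (List (String × Bool))) × (List (List (String × Bool))) × (List (List (String × Bool)))) : (List (List (String × Bool))) × (List (List (String × Bool))) × (List (List (String × Bool))) × (List (List (String × Bool))) × (List (List (String × Bool))) × (List (List (String × Bool))) :=
  (r.1, r.2.1, r.2.2, d.1, d.2.1, d.2.2)

def spread_heroes_left_alt (heroes_left : List (List (String × Bool))) (radiant_hard : List (List (String × Bool))) (radiant_safe : List (List (String × Bool))) (radiant_mid : List (List (String × Bool))) (dire_hard : List (List (String × Bool))) (dire_safe : List (List (String × Bool))) (dire_mid : List (List (String × Bool))) : (List (List (String × Bool))) × (List (List (String × Bool))) × (List (List (String × Bool))) × (List (List (String × Bool))) × (List (List (String × Bool))) × (List (List (String × Bool))) :=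
  let radiant := heroes_left.filter (fun p => pvIsRad p)
  let dire := heroes_left.filter (fun p => !(pvIsRad p))
  pvJoin (pvFillTeam radiant_hard radiant_safe radiant_mid radiant)
         (pvFillTeam dire_hard dire_safe dire_mid dire)

-- ===== PRECONDITION & SPEC =====
-- Pre_ excludes exactly the inputs where some player dict lacks the 'isRadiant' key: there the Python A (and B) raise KeyError.
def Pre_spread_heroes_left (heroes_left : List (List (String × Bool))) (radiant_hard : List (List (String × Bool))) (radiant_safe : List (List (String × Bool))) (radiant_mid : List (List (String × Bool))) (dire_hard : List (List (String × Bool))) (dire_safe : List (List (String × Bool))) (dire_mid : List (List (String × Bool))) : Prop :=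
  ∀ player ∈ heroes_left, "isRadiant" ∈ player.map Prod.fst
instance (heroes_left : List (List (String × Bool))) (radiant_hard : List (List (String × Bool))) (radiant_safe : List (List (String × Bool))) (radiant_mid : List (List (String × Bool))) (dire_hard : List (List (String × Bool))) (dire_safe : List (List (String × Bool))) (dire_mid : List (List (String × Bool))) : Decidable (Pre_spread_heroes_left heroes_left radiant_hard radiant_safe radiant_mid dire_hard dire_safe dire_mid) := by unfold Pre_spread_heroes_left; infer_instance

def pvWitness_spread_heroes_left : (List (List (String × Bool))) × (List (List (String × Bool))) × (List (List (String × Bool))) × (List (List (String × Bool))) × (List (List (String × Bool))) × (List (List (String × Bool))) × (List (List (String × Bool))) :=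
  ([[("isRadiant", true)], [("isRadiant", false)]], [[("isRadiant", true)]], [], [], [], [], [])

def Spec_spread_heroes_left (heroes_left : List (List (String × Bool))) (radiant_hard : List (List (String × Bool))) (radiant_safe : List (List (String × Bool))) (radiant_mid : List (List (String × Bool))) (dire_hard : List (List (String × Bool))) (dire_safe : List (List (String × Bool))) (dire_mid : List (List (String × Bool))) (out : (List (List (String × Bool))) × (List (List (String × Bool))) × (List (List (String × Bool))) × (List (List (String × Bool))) × (List (List (String × Bool))) × (List (List (String × Bool)))) : Prop := out = spread_heroes_left_alt heroes_left radiant_hard radiant_safe radiant_mid dire_hard dire_safe dire_mid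
instance (heroes_left : List (List (String × Bool))) (radiant_hard : List (List (String × Bool))) (radiant_safe : List (List (String × Bool))) (radiant_mid : List (List (String × Bool))) (dire_hard : List (List (String × Bool))) (dire_safe : List (List (String × Bool))) (dire_mid : List (List (String × Bool))) (out : (List (List (String × Bool))) × (List (List (String × Bool))) × (List (List (String × Bool))) × (List (List (String × Bool))) × (List (List (String × Bool))) × (List (List (String × Bool)))) : Decidable (Spec_spread_heroes_left heroes_left radiant_hard radiant_safe radiant_mid dire_hard dire_safe dire_mid out) := by
  unfold Spec_spread_heroes_left
  letI h0 : DecidableEq (List (List (String × Bool))) := inferInstance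
  letI h1 : DecidableEq (List (List (String × Bool)) × List (List (String × Bool))) := instDecidableEqProd
  letI h2 : DecidableEq (List (List (String × Bool)) × List (List (String × Bool)) × List (List (String × Bool))) := instDecidableEqProd
  letI h3 : DecidableEq (List (List (String × Bool)) × List (List (String × Bool)) × List (List (String × Bool)) × List (List (String × Bool))) := instDecidableEqProd
  letI h4 : DecidableEq (List (List (String × Bool)) × List (List (String × Bool)) × List (List (String × Bool)) × List (List (String × Bool)) × List (List (String × Bool))) := instDecidableEqProd
  letI h5 : DecidableEq (List (List (String × Bool)) × List (List (String × Bool)) × List (List (String × Bool)) × List (List (String × Bool)) × List (List (String × Bool)) × List (List (String × Bool))) := instDecidableEqProd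
  exact h5 _ _

-- ===== CLAIM (what is proved, stated in full; the proofs are below) =====
def Claim_equal_spread_heroes_left : Prop := ∀ (heroes_left : List (List (String × Bool))) (radiant_hard : List (List (String × Bool))) (radiant_safe : List (List (String × Bool))) (radiant_mid : List (List (String × Bool))) (dire_hard : List (List (String × Bool))) (dire_safe : List (List (String × Bool))) (dire_mid : List (List (String × Bool))), Dom_spread_heroes_left heroes_left radiant_hard radiant_safe radiant_mid dire_hard dire_safe dire_mid → Pre_spread_heroes_left heroes_left radiant_hard radiant_safe radiant_mid dire_hard dire_safe dire_mid → Spec_spread_heroes_left heroes_left radiant_hard radiant_safe radiant_mid dire_hard dire_safe dire_mid (spread_heroes_left heroes_left radiant_hard radiant_safe radiant_mid dire_hard dire_safe dire_mid)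

-- ===== LEMMAS AND PROOFS =====

-- assigning the head player of a team equals A's if/elif chain on the three buckets
lemma pvFillTeam_cons (h s m : List (List (String × Bool))) (p : List (String × Bool)) (team : List (List (String × Bool))) :
    pvFillTeam h s m (p :: team) =
      (if h.length = 1 then pvFillTeam (h ++ [p]) s m team
       else if s.length = 1 then pvFillTeam h (s ++ [p]) m team
       else if m.length = 0 then pvFillTeam h s (m ++ [p]) team
       else pvFillTeam h s m team) := by
  unfold pvFillTeam
  by_cases h1 : h.length = 1
  · have h1' : ¬ (h ++ [p]).length = 1 := by simp [h1]
    simp [pvOpens, h1, h1', pvAssign]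
  · by_cases h2 : s.length = 1
    · have h2' : ¬ (s ++ [p]).length = 1 := by simp [h2]
      simp [pvOpens, h1, h2, h2', pvAssign]
    · by_cases h3 : m.length = 0
      · have h3' : ¬ (m ++ [p]).length = 0 := by simp
        simp [pvOpens, h1, h2, h3, h3', pvAssign]
      · simp [pvOpens, h1, h2, h3]

lemma pvFillTeam_nil (h s m : List (List (String × Bool))) :
    pvFillTeam h s m [] = (h, s, m) := by
  unfold pvFillTeam
  cases hz : (pvOpens h s m).zip ([] : List (List (String × Bool))) with
  | nil => simp [pvAssign]
  | cons a b => simp at hz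

lemma foldA_eq (hl : List (List (String × Bool))) :
    ∀ rh rs rm dh ds dm : List (List (String × Bool)),
      hl.foldl pvStepA (rh, rs, rm, dh, ds, dm) =
        spread_heroes_left_alt hl rh rs rm dh ds dm := by
  induction hl with
  | nil =>
      intro rh rs rm dh ds dm
      simp [spread_heroes_left_alt, pvFillTeam_nil, pvJoin]
  | cons p rest ih =>
      intro rh rs rm dh ds dm
      rw [List.foldl_cons]
      by_cases hp : pvIsRad p = true
      · simp only [spread_heroes_left_alt, List.filter_cons, hp, Bool.not_true,
          if_true, Bool.false_eq_true, if_false]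
        rw [pvFillTeam_cons]
        simp only [pvStepA, hp, if_true]
        split_ifs with h1 h2 h3 <;> simp [ih, spread_heroes_left_alt]
      · have hp' : pvIsRad p = false := by
          cases hv : pvIsRad p
          · rfl
          · exact absurd hv hp
        simp only [spread_heroes_left_alt, List.filter_cons, hp', Bool.not_false,
          if_true, Bool.false_eq_true, if_false]
        rw [pvFillTeam_cons]
        simp only [pvStepA, hp', Bool.false_eq_true, if_false, if_true]
        split_ifs with h1 h2 h3 <;> simp [ih, spread_heroes_left_alt]

-- ===== VERDICT (by name: the statement is the Claim_ definition above) =====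
theorem spread_heroes_left_spec : Claim_equal_spread_heroes_left := by
  intro hl rh rs rm dh ds dm _ _
  unfold Spec_spread_heroes_left spread_heroes_left
  exact (foldA_eq hl rh rs rm dh ds dm).symm ▸ rfl
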